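-- pv_equiv track=rewrite | github.com/UofGSocialRobotics/Conversational-Agent | helper_functions.py | string_contain_common_word
-- ===== SOURCE A (Python) =====
-- def string_contain_common_word(string1, string2):
--     d = {}
--     for word in string1.split():
--       d[word] = True
--     for word in string2.split():
--       if word in d.keys():
--         return True
--     return False
-- ===== SOURCE B (Python) =====
-- def string_contain_common_word(string1, string2):
--     xs = sorted(set(string1.split()))
--     ys = sorted(set(string2.split()))
--     i = j = 0
--     while i < len(xs) and j < len(ys):
--         if xs[i] == ys[j]:
--             return True
--         if xs[i] < ys[j]:
--             i += 1
--         else: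
--             j += 1
--     return False
-- ===== Notes on version B (the rewrite author's own statement) =====
-- stated objective: alternative
-- what changed: Replaces A's hash-dict build plus membership loop with a sort-then-merge algorithm: both word lists are deduplicated and sorted, then a two-pointer merge scan detects a shared word.
import Mathlib
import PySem

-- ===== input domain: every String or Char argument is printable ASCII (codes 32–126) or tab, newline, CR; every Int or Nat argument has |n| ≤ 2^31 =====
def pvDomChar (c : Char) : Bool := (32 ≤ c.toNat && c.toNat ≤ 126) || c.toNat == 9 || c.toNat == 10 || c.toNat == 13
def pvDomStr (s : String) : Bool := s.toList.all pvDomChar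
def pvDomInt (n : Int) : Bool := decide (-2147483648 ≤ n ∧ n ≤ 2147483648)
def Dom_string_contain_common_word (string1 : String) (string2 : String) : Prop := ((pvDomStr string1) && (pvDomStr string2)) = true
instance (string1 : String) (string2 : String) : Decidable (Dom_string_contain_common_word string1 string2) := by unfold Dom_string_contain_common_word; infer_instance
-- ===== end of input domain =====

-- B replaces A's dict-building loop + membership loop by a different algorithm:
-- sort both deduplicated word lists and run a two-pointer merge scan (alternative).

-- ===== PORT A =====
-- the second 'for word in string2.split(): if word in d.keys(): return True' loop
def pvLoopA (d : PySem.Dict String Bool) : List String → Bool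
  | [] => false
  | w :: ws => if d.contains w then true else pvLoopA d ws

def string_contain_common_word (string1 : String) (string2 : String) : Bool :=
  let d := (PySem.Str.split₀ string1).foldl (fun d w => d.insert w true) PySem.Dict.empty
  pvLoopA d (PySem.Str.split₀ string2)

-- ===== PORT B =====
-- the two-pointer 'while i < len(xs) and j < len(ys)' merge scan, as structural recursion
def pvMergeB : List String → List String → Bool
  | [], _ => false
  | _, [] => false
  | x :: xs, y :: ys =>
    if x = y then true
    else if x < y then pvMergeB xs (y :: ys)
    else pvMergeB (x :: xs) ys
termination_by a b => a.length + b.length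

def string_contain_common_word_alt (string1 : String) (string2 : String) : Bool :=
  pvMergeB
    (PySem.List.sorted (PySem.Set.ofList (PySem.Str.split₀ string1)) (fun x => x) false)
    (PySem.List.sorted (PySem.Set.ofList (PySem.Str.split₀ string2)) (fun x => x) false)

-- ===== PRECONDITION & SPEC =====
def Spec_string_contain_common_word (string1 : String) (string2 : String) (out : Bool) : Prop := out = string_contain_common_word_alt string1 string2
instance (string1 : String) (string2 : String) (out : Bool) : Decidable (Spec_string_contain_common_word string1 string2 out) := by unfold Spec_string_contain_common_word; infer_instance

-- ===== CLAIM (what is proved, stated in full; the proofs are below) =====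
def Claim_equal_string_contain_common_word : Prop := ∀ (string1 : String) (string2 : String), Dom_string_contain_common_word string1 string2 → Spec_string_contain_common_word string1 string2 (string_contain_common_word string1 string2)

-- ===== LEMMAS AND PROOFS =====

theorem pvLoopA_eq_any (d : PySem.Dict String Bool) (ws : List String) :
    pvLoopA d ws = ws.any (fun w => d.contains w) := by
  induction ws with
  | nil => rfl
  | cons w ws ih => cases h : d.contains w <;> simp [pvLoopA, h, ih]

theorem pvA_iff (s1 s2 : String) :
    string_contain_common_word s1 s2 = true ↔
      ∃ w, w ∈ PySem.Str.split₀ s1 ∧ w ∈ PySem.Str.split₀ s2 := by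
  unfold string_contain_common_word
  rw [pvLoopA_eq_any, List.any_eq_true]
  constructor
  · rintro ⟨w, hw, hc⟩
    refine ⟨w, ?_, hw⟩
    rw [PySem.Dict.contains_iff_mem_keys, PySem.Dict.keys_foldl_insert] at hc
    simpa [PySem.Set.mem_update, PySem.Dict.empty] using hc
  · rintro ⟨w, hm, hw⟩
    refine ⟨w, hw, ?_⟩
    rw [PySem.Dict.contains_iff_mem_keys, PySem.Dict.keys_foldl_insert]
    simpa [PySem.Set.mem_update, PySem.Dict.empty] using hm

-- the merge scan finds a common element of two strictly sorted lists
theorem pvMergeB_iff (xs ys : List String) :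
    xs.Pairwise (· < ·) → ys.Pairwise (· < ·) →
    (pvMergeB xs ys = true ↔ ∃ w, w ∈ xs ∧ w ∈ ys) := by
  fun_induction pvMergeB xs ys with
  | case1 ys => simp
  | case2 xs h => simp
  | case3 xs y ys =>
    intro _ _
    exact ⟨fun _ => ⟨y, by simp, by simp⟩, fun _ => rfl⟩
  | case4 x xs y ys hne hlt ih =>
    intro hx hy
    rw [ih hx.tail hy]
    constructor
    · rintro ⟨w, h1, h2⟩; exact ⟨w, List.mem_cons_of_mem _ h1, h2⟩
    · rintro ⟨w, h1, h2⟩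
      rcases List.mem_cons.mp h1 with rfl | h1
      · rcases List.mem_cons.mp h2 with rfl | h2
        · exact absurd rfl hne
        · exact absurd (lt_trans hlt (List.rel_of_pairwise_cons hy h2)) (lt_irrefl w)
      · exact ⟨w, h1, h2⟩
  | case5 x xs y ys hne hnlt ih =>
    intro hx hy
    have hgt : y < x := lt_of_le_of_ne (not_lt.mp hnlt) (fun h => hne h.symm)
    rw [ih hx hy.tail]
    constructor
    · rintro ⟨w, h1, h2⟩; exact ⟨w, h1, List.mem_cons_of_mem _ h2⟩
    · rintro ⟨w, h1, h2⟩
      rcases List.mem_cons.mp h2 with rfl | h2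
      · rcases List.mem_cons.mp h1 with rfl | h1
        · exact absurd rfl hne
        · exact absurd (lt_trans hgt (List.rel_of_pairwise_cons hx h1)) (lt_irrefl w)
      · exact ⟨w, h1, h2⟩

theorem pvB_iff (s1 s2 : String) :
    string_contain_common_word_alt s1 s2 = true ↔
      ∃ w, w ∈ PySem.Str.split₀ s1 ∧ w ∈ PySem.Str.split₀ s2 := by
  unfold string_contain_common_word_alt
  rw [pvMergeB_iff _ _ (PySem.List.sorted_ofList_pairwise_lt _)
      (PySem.List.sorted_ofList_pairwise_lt _)]
  simp [PySem.List.mem_sorted, PySem.Set.mem_ofList]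

-- ===== VERDICT (by name: the statement is the Claim_ definition above) =====
theorem string_contain_common_word_spec : Claim_equal_string_contain_common_word := by
  intro s1 s2 _
  unfold Spec_string_contain_common_word
  rw [Bool.eq_iff_iff, pvA_iff, pvB_iff]
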